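-- pv_equiv track=rewrite | github.com/akashnair2005/MentalHealthAI | agents/therapist_agent.py | get_enhanced_fallback
-- ===== SOURCE A (Python) =====
-- FALLBACK = {
--     "sad": "I can hear that you're going through something difficult. I'm here for you. What's weighing on your heart right now?",
--     "angry": "It sounds like something has really upset you. That's understandable. Would you like to tell me more about what happened?",
--     "happy": "That's wonderful to hear! I'm glad you're feeling good. What made your day better?",
--     "fear": "It's okay to feel scared. Many people experience fear. What specifically is worrying you?",
--     "anxious": "I understand that you're worried about something. Let's talk through it together. What's on your mind?",
--     "neutral": "I'm listening. Tell me more about what's going on."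
-- }
--
-- def get_enhanced_fallback(text, emotion):
--     """Return enhanced fallback while model is loading"""
--     # Parse text to make fallback more contextual
--     text_lower = text.lower()
--
--     if emotion == "sad":
--         if any(w in text_lower for w in ["lost", "death", "died", "died"]):
--             return "I'm so sorry for your loss. That must be incredibly painful. Would you like to share about what you've lost?"
--         elif any(w in text_lower for w in ["alone", "lonely"]):
--             return "Feeling alone is really hard. You're not the only one who feels this way. What's making you feel isolated right now?"
--         else:
--             return FALLBACK["sad"]
--
--     elif emotion == "angry":
--         if any(w in text_lower for w in ["someone", "friend", "family", "person"]):
--             return "It sounds like someone has hurt you. That must feel betraying. Do you want to talk about what they did?"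
--         else:
--             return FALLBACK["angry"]
--
--     elif emotion == "anxious":
--         if any(w in text_lower for w in ["work", "job", "deadline"]):
--             return "Work stress is real. Many people feel this way. What specifically about this is worrying you the most?"
--         elif any(w in text_lower for w in ["test", "exam", "failure"]):
--             return "Exam anxiety is tough, but you're going to get through this. What's the biggest worry for you?"
--         else:
--             return FALLBACK["anxious"]
--
--     elif emotion == "fear":
--         if any(w in text_lower for w in ["dark", "alone", "outside"]):
--             return "Specific fears like that are more common than you'd think. Can you tell me what specifically triggers this fear?"
--         else:
--             return FALLBACK["fear"]
--
--     elif emotion == "happy":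
--         return FALLBACK["happy"]
--
--     else:
--         return FALLBACK["neutral"]
-- ===== SOURCE B (Python) =====
-- FALLBACK = {
--     "sad": "I can hear that you're going through something difficult. I'm here for you. What's weighing on your heart right now?",
--     "angry": "It sounds like something has really upset you. That's understandable. Would you like to tell me more about what happened?",
--     "happy": "That's wonderful to hear! I'm glad you're feeling good. What made your day better?",
--     "fear": "It's okay to feel scared. Many people experience fear. What specifically is worrying you?",
--     "anxious": "I understand that you're worried about something. Let's talk through it together. What's on your mind?",
--     "neutral": "I'm listening. Tell me more about what's going on."
-- }
--
-- _M_LOSS = "I'm so sorry for your loss. That must be incredibly painful. Would you like to share about what you've lost?"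
-- _M_ALONE = "Feeling alone is really hard. You're not the only one who feels this way. What's making you feel isolated right now?"
-- _M_HURT = "It sounds like someone has hurt you. That must feel betraying. Do you want to talk about what they did?"
-- _M_WORK = "Work stress is real. Many people feel this way. What specifically about this is worrying you the most?"
-- _M_EXAM = "Exam anxiety is tough, but you're going to get through this. What's the biggest worry for you?"
-- _M_FEAR = "Specific fears like that are more common than you'd think. Can you tell me what specifically triggers this fear?"
--
-- # One flat priority list at keyword granularity: (emotion, keyword, message).
-- TRIPLES = [
--     ("sad", "lost", _M_LOSS), ("sad", "death", _M_LOSS), ("sad", "died", _M_LOSS),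
--     ("sad", "alone", _M_ALONE), ("sad", "lonely", _M_ALONE),
--     ("angry", "someone", _M_HURT), ("angry", "friend", _M_HURT),
--     ("angry", "family", _M_HURT), ("angry", "person", _M_HURT),
--     ("anxious", "work", _M_WORK), ("anxious", "job", _M_WORK), ("anxious", "deadline", _M_WORK),
--     ("anxious", "test", _M_EXAM), ("anxious", "exam", _M_EXAM), ("anxious", "failure", _M_EXAM),
--     ("fear", "dark", _M_FEAR), ("fear", "alone", _M_FEAR), ("fear", "outside", _M_FEAR),
-- ]
--
-- DEFAULT = {e: FALLBACK[e] for e in ("sad", "angry", "anxious", "fear", "happy")}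
--
-- def get_enhanced_fallback(text, emotion):
--     """Return enhanced fallback while model is loading (flat keyword-triple filter)."""
--     text_lower = text.lower()
--     matches = [msg for emo, kw, msg in TRIPLES if emo == emotion and kw in text_lower]
--     if matches:
--         return matches[0]
--     return DEFAULT.get(emotion, FALLBACK["neutral"])
-- ===== Notes on version B (the rewrite author's own statement) =====
-- stated objective: alternative
-- what changed: Replaces the nested per-emotion if/elif dispatch with short-circuiting any() tests by one flat keyword-granularity priority list of (emotion, keyword, message) triples, filtered in a single comprehension whose first hit is the answer, with a DEFAULT dict lookup (neutral default) for misses.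
import Mathlib
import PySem

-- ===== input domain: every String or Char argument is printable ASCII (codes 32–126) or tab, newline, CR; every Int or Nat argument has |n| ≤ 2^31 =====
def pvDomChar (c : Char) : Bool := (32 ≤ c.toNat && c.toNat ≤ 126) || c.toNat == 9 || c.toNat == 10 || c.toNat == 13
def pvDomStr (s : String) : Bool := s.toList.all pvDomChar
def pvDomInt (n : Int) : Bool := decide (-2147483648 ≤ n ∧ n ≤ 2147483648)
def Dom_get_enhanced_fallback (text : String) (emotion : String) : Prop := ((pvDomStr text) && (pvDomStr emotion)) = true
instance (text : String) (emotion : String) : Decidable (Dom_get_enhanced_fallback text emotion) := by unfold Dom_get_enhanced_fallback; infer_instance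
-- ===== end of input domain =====

-- B replaces A's nested per-emotion if/elif dispatch by a single filter pass over a flat
-- keyword-granularity priority list of (emotion, keyword, message) triples (objective:
-- alternative); same return value on every input.

-- ===== PORT A =====
-- module constant FALLBACK (a dict); A only reads keys that are present, so the total
-- getD with "" is exact at every access A performs.
def pvFALLBACK : PySem.Dict String String := PySem.Dict.ofList [
  ("sad", "I can hear that you're going through something difficult. I'm here for you. What's weighing on your heart right now?"),
  ("angry", "It sounds like something has really upset you. That's understandable. Would you like to tell me more about what happened?"),
  ("happy", "That's wonderful to hear! I'm glad you're feeling good. What made your day better?"),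
  ("fear", "It's okay to feel scared. Many people experience fear. What specifically is worrying you?"),
  ("anxious", "I understand that you're worried about something. Let's talk through it together. What's on your mind?"),
  ("neutral", "I'm listening. Tell me more about what's going on.")]

def get_enhanced_fallback (text : String) (emotion : String) : String :=
  let text_lower := PySem.Str.lower text
  if emotion = "sad" then
    if ["lost", "death", "died", "died"].any (fun w => PySem.Str.isIn w text_lower) then
      "I'm so sorry for your loss. That must be incredibly painful. Would you like to share about what you've lost?"
    else if ["alone", "lonely"].any (fun w => PySem.Str.isIn w text_lower) then
      "Feeling alone is really hard. You're not the only one who feels this way. What's making you feel isolated right now?"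
    else pvFALLBACK.getD "sad" ""
  else if emotion = "angry" then
    if ["someone", "friend", "family", "person"].any (fun w => PySem.Str.isIn w text_lower) then
      "It sounds like someone has hurt you. That must feel betraying. Do you want to talk about what they did?"
    else pvFALLBACK.getD "angry" ""
  else if emotion = "anxious" then
    if ["work", "job", "deadline"].any (fun w => PySem.Str.isIn w text_lower) then
      "Work stress is real. Many people feel this way. What specifically about this is worrying you the most?"
    else if ["test", "exam", "failure"].any (fun w => PySem.Str.isIn w text_lower) then
      "Exam anxiety is tough, but you're going to get through this. What's the biggest worry for you?"
    else pvFALLBACK.getD "anxious" ""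
  else if emotion = "fear" then
    if ["dark", "alone", "outside"].any (fun w => PySem.Str.isIn w text_lower) then
      "Specific fears like that are more common than you'd think. Can you tell me what specifically triggers this fear?"
    else pvFALLBACK.getD "fear" ""
  else if emotion = "happy" then
    pvFALLBACK.getD "happy" ""
  else
    pvFALLBACK.getD "neutral" ""

-- ===== PORT B =====
def pvM_LOSS : String := "I'm so sorry for your loss. That must be incredibly painful. Would you like to share about what you've lost?"
def pvM_ALONE : String := "Feeling alone is really hard. You're not the only one who feels this way. What's making you feel isolated right now?"
def pvM_HURT : String := "It sounds like someone has hurt you. That must feel betraying. Do you want to talk about what they did?"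
def pvM_WORK : String := "Work stress is real. Many people feel this way. What specifically about this is worrying you the most?"
def pvM_EXAM : String := "Exam anxiety is tough, but you're going to get through this. What's the biggest worry for you?"
def pvM_FEAR : String := "Specific fears like that are more common than you'd think. Can you tell me what specifically triggers this fear?"

-- one flat priority list at keyword granularity: (emotion, keyword, message)
def pvTRIPLES : List (String × String × String) := [
  ("sad", "lost", pvM_LOSS), ("sad", "death", pvM_LOSS), ("sad", "died", pvM_LOSS),
  ("sad", "alone", pvM_ALONE), ("sad", "lonely", pvM_ALONE),
  ("angry", "someone", pvM_HURT), ("angry", "friend", pvM_HURT),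
  ("angry", "family", pvM_HURT), ("angry", "person", pvM_HURT),
  ("anxious", "work", pvM_WORK), ("anxious", "job", pvM_WORK), ("anxious", "deadline", pvM_WORK),
  ("anxious", "test", pvM_EXAM), ("anxious", "exam", pvM_EXAM), ("anxious", "failure", pvM_EXAM),
  ("fear", "dark", pvM_FEAR), ("fear", "alone", pvM_FEAR), ("fear", "outside", pvM_FEAR)]

def pvDEFAULT : PySem.Dict String String := PySem.Dict.ofList [
  ("sad", pvFALLBACK.getD "sad" ""), ("angry", pvFALLBACK.getD "angry" ""),
  ("anxious", pvFALLBACK.getD "anxious" ""), ("fear", pvFALLBACK.getD "fear" ""),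
  ("happy", pvFALLBACK.getD "happy" "")]

def get_enhanced_fallback_alt (text : String) (emotion : String) : String :=
  let text_lower := PySem.Str.lower text
  -- [msg for emo, kw, msg in TRIPLES if emo == emotion and kw in text_lower]
  let hits := (pvTRIPLES.filter
      (fun t => t.1 == emotion && PySem.Str.isIn t.2.1 text_lower)).map (fun t => t.2.2)
  match hits with
  | m :: _ => m                                   -- if matches: return matches[0]
  | [] => (pvDEFAULT.get? emotion).getD (pvFALLBACK.getD "neutral" "")

-- ===== PRECONDITION & SPEC =====
def Spec_get_enhanced_fallback (text : String) (emotion : String) (out : String) : Prop := out = get_enhanced_fallback_alt text emotion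
instance (text : String) (emotion : String) (out : String) : Decidable (Spec_get_enhanced_fallback text emotion out) := by unfold Spec_get_enhanced_fallback; infer_instance

-- ===== CLAIM (what is proved, stated in full; the proofs are below) =====
def Claim_equal_get_enhanced_fallback : Prop := ∀ (text : String) (emotion : String), Dom_get_enhanced_fallback text emotion → Spec_get_enhanced_fallback text emotion (get_enhanced_fallback text emotion)

-- ===== LEMMAS AND PROOFS =====
theorem pv_unknown_get? (emotion : String) (h1 : emotion ≠ "sad") (h2 : emotion ≠ "angry")
    (h3 : emotion ≠ "anxious") (h4 : emotion ≠ "fear") (h5 : emotion ≠ "happy") :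
    pvDEFAULT.get? emotion = none := by
  simp [pvDEFAULT, PySem.Dict.get?, PySem.Dict.ofList, PySem.Dict.update, PySem.Dict.empty,
        PySem.Dict.insert]
  exact ⟨Ne.symm h1, Ne.symm h2, Ne.symm h3, Ne.symm h4, Ne.symm h5⟩

theorem pv_filter_nil (emotion tl : String) (h1 : emotion ≠ "sad") (h2 : emotion ≠ "angry")
    (h3 : emotion ≠ "anxious") (h4 : emotion ≠ "fear") :
    pvTRIPLES.filter (fun t => t.1 == emotion && PySem.Str.isIn t.2.1 tl) = [] := by
  rw [List.filter_eq_nil_iff]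
  intro a ha
  fin_cases ha <;> simp [beq_iff_eq, Ne.symm h1, Ne.symm h2, Ne.symm h3, Ne.symm h4]

-- ===== VERDICT (by name: the statement is the Claim_ definition above) =====
theorem get_enhanced_fallback_spec : Claim_equal_get_enhanced_fallback := by
  intro text emotion _
  unfold Spec_get_enhanced_fallback get_enhanced_fallback get_enhanced_fallback_alt
  by_cases h1 : emotion = "sad"
  · subst h1
    cases hw1 : PySem.Str.isIn "lost" (PySem.Str.lower text) <;>
    cases hw2 : PySem.Str.isIn "death" (PySem.Str.lower text) <;>
    cases hw3 : PySem.Str.isIn "died" (PySem.Str.lower text) <;>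
    cases hw4 : PySem.Str.isIn "alone" (PySem.Str.lower text) <;>
    cases hw5 : PySem.Str.isIn "lonely" (PySem.Str.lower text) <;>
      simp_all [pvTRIPLES, List.filter, pvM_LOSS, pvM_ALONE, pvM_HURT, pvM_WORK, pvM_EXAM, pvM_FEAR, pvDEFAULT, pvFALLBACK, PySem.Dict.getD, PySem.Dict.get?, PySem.Dict.ofList, PySem.Dict.update, PySem.Dict.empty, PySem.Dict.insert]
  by_cases h2 : emotion = "angry"
  · subst h2
    cases hw1 : PySem.Str.isIn "someone" (PySem.Str.lower text) <;>
    cases hw2 : PySem.Str.isIn "friend" (PySem.Str.lower text) <;>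
    cases hw3 : PySem.Str.isIn "family" (PySem.Str.lower text) <;>
    cases hw4 : PySem.Str.isIn "person" (PySem.Str.lower text) <;>
      simp_all [pvTRIPLES, List.filter, pvM_LOSS, pvM_ALONE, pvM_HURT, pvM_WORK, pvM_EXAM, pvM_FEAR, pvDEFAULT, pvFALLBACK, PySem.Dict.getD, PySem.Dict.get?, PySem.Dict.ofList, PySem.Dict.update, PySem.Dict.empty, PySem.Dict.insert]
  by_cases h3 : emotion = "anxious"
  · subst h3
    cases hw1 : PySem.Str.isIn "work" (PySem.Str.lower text) <;>
    cases hw2 : PySem.Str.isIn "job" (PySem.Str.lower text) <;>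
    cases hw3 : PySem.Str.isIn "deadline" (PySem.Str.lower text) <;>
    cases hw4 : PySem.Str.isIn "test" (PySem.Str.lower text) <;>
    cases hw5 : PySem.Str.isIn "exam" (PySem.Str.lower text) <;>
    cases hw6 : PySem.Str.isIn "failure" (PySem.Str.lower text) <;>
      simp_all [pvTRIPLES, List.filter, pvM_LOSS, pvM_ALONE, pvM_HURT, pvM_WORK, pvM_EXAM, pvM_FEAR, pvDEFAULT, pvFALLBACK, PySem.Dict.getD, PySem.Dict.get?, PySem.Dict.ofList, PySem.Dict.update, PySem.Dict.empty, PySem.Dict.insert]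
  by_cases h4 : emotion = "fear"
  · subst h4
    cases hw1 : PySem.Str.isIn "dark" (PySem.Str.lower text) <;>
    cases hw2 : PySem.Str.isIn "alone" (PySem.Str.lower text) <;>
    cases hw3 : PySem.Str.isIn "outside" (PySem.Str.lower text) <;>
      simp_all [pvTRIPLES, List.filter, pvM_LOSS, pvM_ALONE, pvM_HURT, pvM_WORK, pvM_EXAM, pvM_FEAR, pvDEFAULT, pvFALLBACK, PySem.Dict.getD, PySem.Dict.get?, PySem.Dict.ofList, PySem.Dict.update, PySem.Dict.empty, PySem.Dict.insert]
  by_cases h5 : emotion = "happy"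
  · subst h5
    simp [pvTRIPLES, List.filter, pvDEFAULT, pvFALLBACK, PySem.Dict.getD, PySem.Dict.get?,
          PySem.Dict.ofList, PySem.Dict.update, PySem.Dict.empty, PySem.Dict.insert]
  · simp only [h1, h2, h3, h4, h5, if_false,
          pv_filter_nil emotion (PySem.Str.lower text) h1 h2 h3 h4, List.map_nil]
    rw [pv_unknown_get? emotion h1 h2 h3 h4 h5]
    rfl
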